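-- pv_equiv track=rewrite | github.com/dgreenslade/advent-of-code-2024 | solutions/d09.py | check_empty_block
-- ===== SOURCE A (Python) =====
-- def check_empty_block(empty: list, min_length: int, pos: int) -> tuple:
--     # Exit if reach empty list size
--     if pos >= len(empty):
--         return None, pos
--     length = 1 # starting length
--     orig_pos = pos
--     # Determine size for current empty block
--     for i in range(len(list(empty)[pos:]) - 1):
--         if empty[pos] == empty[pos+1] - 1 and empty[pos]:
--             length += 1
--             pos += 1
--         else:
--             break
--     # Return if empty block meets conditions
--     if length >= min_length:
--         return length, orig_pos
--     # If not, check next empty block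
--     else:
--         pos += 1
--         return check_empty_block(empty, min_length, pos)
-- ===== SOURCE B (Python) =====
-- def check_empty_block(empty: list, min_length: int, pos: int) -> tuple:
--     n = len(empty)
--     # one backward pass: rl[i] = length of the consecutive run starting at i
--     rl = [1] * n
--     for i in range(n - 2, -1, -1):
--         if empty[i] == empty[i + 1] - 1 and empty[i]:
--             rl[i] = rl[i + 1] + 1
--     # skip-scan: jump block by block
--     p = pos
--     while p < n:
--         length = rl[p]
--         if length >= min_length:
--             return length, p
--         p += length
--     return None, p
-- ===== Notes on version B (the rewrite author's own statement) =====
-- stated objective: faster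
-- what changed: Replaced A's tail recursion with a per-call list copy/slice by a single backward pass that precomputes a run-length table rl[i] (length of the consecutive run starting at i) plus a skip-scan that jumps block to block over that table.
-- outside the precondition, e.g. on check_empty_block([4], 0, -8): A returns (1, -8), B raises IndexError; on check_empty_block([1, 2], 1, -5): A raises IndexError, B raises IndexError
import Mathlib
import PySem

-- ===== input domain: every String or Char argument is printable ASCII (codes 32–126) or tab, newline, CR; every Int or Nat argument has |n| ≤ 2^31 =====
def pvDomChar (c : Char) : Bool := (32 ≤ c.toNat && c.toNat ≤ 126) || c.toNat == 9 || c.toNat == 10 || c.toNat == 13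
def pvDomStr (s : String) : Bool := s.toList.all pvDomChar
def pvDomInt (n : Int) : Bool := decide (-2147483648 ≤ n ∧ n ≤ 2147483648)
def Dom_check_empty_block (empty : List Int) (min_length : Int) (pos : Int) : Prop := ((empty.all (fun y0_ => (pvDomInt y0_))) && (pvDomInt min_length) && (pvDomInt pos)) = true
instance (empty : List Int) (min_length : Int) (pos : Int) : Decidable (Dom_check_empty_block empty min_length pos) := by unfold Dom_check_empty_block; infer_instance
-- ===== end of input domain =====

-- B replaces A's tail recursion with per-call list copy/slice by a backward run-length
-- table (rl[i] = length of the run starting at i) built once, plus a skip-scan over it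
-- (measured faster; return-value equivalence proved on pos ≥ 0).

-- ===== PORT A =====
-- A's for-loop over range(len(list(empty)[pos:]) - 1); state (length, pos), break on a
-- failed comparison.  pyGet? = none means Python would raise IndexError (only reachable
-- for negative pos, outside Pre_); the port breaks there.
def aInner (empty : List Int) (k : Nat) (length pos : Int) : Int × Int :=
  match k with
  | 0 => (length, pos)
  | Nat.succ k =>
    match PySem.List.pyGet? empty pos, PySem.List.pyGet? empty (pos + 1) with
    | some a, some b =>
      if a = b - 1 ∧ a ≠ 0 then aInner empty k (length + 1) (pos + 1) else (length, pos)
    | _, _ => (length, pos)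

-- A's tail recursion, made total with a fuel counter; fuel = (len(empty) - pos).toNat is
-- enough because pos strictly grows toward len(empty), and when fuel runs out pos ≥
-- len(empty) already holds, which is exactly the (None, pos) base case.
def aGo (empty : List Int) (min_length : Int) : Nat → Int → Option Int × Int
  | 0, pos => (none, pos)
  | Nat.succ fuel, pos =>
    if pos ≥ (empty.length : Int) then (none, pos)
    else
      -- len(list(empty)[pos:]) - 1, the for-loop's iteration count
      let k : Int := ((PySem.List.slice empty (some pos) none).length : Int) - 1
      let r := aInner empty k.toNat 1 pos
      if min_length ≤ r.1 then (some r.1, pos)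
      else aGo empty min_length fuel (r.2 + 1)

def check_empty_block (empty : List Int) (min_length : Int) (pos : Int) : Option Int × Int :=
  aGo empty min_length ((empty.length : Int) - pos).toNat pos

-- ===== PORT B =====
-- Source B's backward pass 'for i in range(n-2, -1, -1): rl[i] = rl[i+1]+1 if …':
-- structural recursion computing each rl[i] from rl[i+1], same dataflow.
def runLens : List Int → List Nat
  | [] => []
  | a :: rest =>
    let rs := runLens rest
    (match rest with
     | [] => 1
     | b :: _ => if a = b - 1 ∧ a ≠ 0 then rs.headD 1 + 1 else 1) :: rs

-- Source B's skip-scan 'while p < n: …  p += rl[p]'; fuel = (n - pos).toNat bounds the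
-- iterations since p grows by rl[p] ≥ 1 each time.  rl[p] is in range under the loop
-- guard for p ≥ 0, so getD's default is unreachable inside Pre_.
def skipGo (rl : List Nat) (m : Int) : Nat → Int → Option Int × Int
  | 0, p => (none, p)
  | Nat.succ fuel, p =>
    if p < (rl.length : Int) then
      let L : Int := (rl.getD p.toNat 1 : Nat)
      if m ≤ L then (some L, p) else skipGo rl m fuel (p + L)
    else (none, p)

def check_empty_block_alt (empty : List Int) (min_length : Int) (pos : Int) : Option Int × Int :=
  skipGo (runLens empty) min_length ((empty.length : Int) - pos).toNat pos

-- ===== PRECONDITION & SPEC =====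
-- Pre_ excludes negative pos: there A relies on Python's negative-index wraparound
-- (raising IndexError once pos < -len(empty) with len ≥ 2, accidental values otherwise)
-- and B's run-length-table indexing itself raises IndexError whenever pos < -len(empty).
def Pre_check_empty_block (empty : List Int) (min_length : Int) (pos : Int) : Prop := 0 ≤ pos
instance (empty : List Int) (min_length : Int) (pos : Int) : Decidable (Pre_check_empty_block empty min_length pos) := by unfold Pre_check_empty_block; infer_instance

def pvWitness_check_empty_block : List Int × Int × Int := ([1, 2, 4], 2, 0)

def Spec_check_empty_block (empty : List Int) (min_length : Int) (pos : Int) (out : Option Int × Int) : Prop := out = check_empty_block_alt empty min_length pos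
instance (empty : List Int) (min_length : Int) (pos : Int) (out : Option Int × Int) : Decidable (Spec_check_empty_block empty min_length pos out) := by unfold Spec_check_empty_block; infer_instance

-- ===== CLAIM (what is proved, stated in full; the proofs are below) =====
def Claim_equal_check_empty_block : Prop := ∀ (empty : List Int) (min_length : Int) (pos : Int), Dom_check_empty_block empty min_length pos → Pre_check_empty_block empty min_length pos → Spec_check_empty_block empty min_length pos (check_empty_block empty min_length pos)

-- ===== LEMMAS AND PROOFS =====

theorem runLens_length (l : List Int) : (runLens l).length = l.length := by
  induction l with
  | nil => rfl
  | cons a rest ih => simp [runLens, ih]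

theorem runLens_getD_last (l : List Int) (i : Nat) (h : i + 1 = l.length) :
    (runLens l).getD i 1 = 1 := by
  induction l generalizing i with
  | nil => simp at h
  | cons a rest ih =>
    cases i with
    | zero =>
      have : rest = [] := by
        cases rest with
        | nil => rfl
        | cons b t => simp at h
      subst this; rfl
    | succ i =>
      simp only [runLens, List.getD_cons_succ]
      exact ih i (by simpa using h)

theorem runLens_getD_step (l : List Int) (i : Nat) (h : i + 1 < l.length) :
    (runLens l).getD i 1 =
      if l.getD i 0 = l.getD (i + 1) 0 - 1 ∧ l.getD i 0 ≠ 0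
      then (runLens l).getD (i + 1) 1 + 1 else 1 := by
  induction l generalizing i with
  | nil => simp at h
  | cons a rest ih =>
    cases i with
    | zero =>
      cases rest with
      | nil => simp at h
      | cons b t =>
        simp [runLens]
    | succ i =>
      simp only [runLens, List.getD_cons_succ]
      exact ih i (by simpa using h)

theorem inner_char (l : List Int) : ∀ (k : Nat) (len p : Int), 0 ≤ p → p.toNat < l.length →
    k = l.length - 1 - p.toNat →
    aInner l k len p = (len + ((runLens l).getD p.toNat 1 : Nat) - 1,
                        p + ((runLens l).getD p.toNat 1 : Nat) - 1) := by
  intro k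
  induction k with
  | zero =>
    intro len p h0 hlt hk
    have : p.toNat + 1 = l.length := by omega
    rw [aInner, runLens_getD_last l p.toNat this]
    simp
  | succ k ih =>
    intro len p h0 hlt hk
    have hstep : p.toNat + 1 < l.length := by omega
    have hg1 : PySem.List.pyGet? l p = some (l.getD p.toNat 0) := by
      rw [PySem.List.pyGet?_of_nonneg _ h0]
      simp [List.getElem?_eq_getElem hlt, List.getD_eq_getElem?_getD]
    have hg2 : PySem.List.pyGet? l (p + 1) = some (l.getD (p.toNat + 1) 0) := by
      rw [PySem.List.pyGet?_of_nonneg _ (by omega)]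
      have : (p + 1).toNat = p.toNat + 1 := by omega
      rw [this]
      simp [List.getElem?_eq_getElem hstep, List.getD_eq_getElem?_getD]
    rw [aInner, hg1, hg2]
    dsimp only
    rw [runLens_getD_step l p.toNat hstep]
    by_cases hc : l.getD p.toNat 0 = l.getD (p.toNat + 1) 0 - 1 ∧ l.getD p.toNat 0 ≠ 0
    · rw [if_pos hc, if_pos hc]
      have := ih (len + 1) (p + 1) (by omega) (by omega) (by omega)
      rw [this]
      have hp1 : (p + 1).toNat = p.toNat + 1 := by omega
      rw [hp1]
      simp only [Prod.mk.injEq]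
      constructor <;> push_cast <;> ring
    · rw [if_neg hc, if_neg hc]
      simp

theorem outer_eq (empty : List Int) (m : Int) : ∀ (fuel : Nat) (pos : Int), 0 ≤ pos →
    aGo empty m fuel pos = skipGo (runLens empty) m fuel pos := by
  intro fuel
  induction fuel with
  | zero => intro pos _; rfl
  | succ fuel ih =>
    intro pos h0
    rw [aGo, skipGo, runLens_length]
    by_cases h : pos < (empty.length : Int)
    · rw [if_neg (by omega), if_pos h]
      have hcast : pos = ((pos.toNat : Nat) : Int) := by omega
      have hs : (PySem.List.slice empty (some pos) none).length = empty.length - pos.toNat := by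
        conv_lhs => rw [hcast, PySem.List.slice_from_natCast]
        simp
      have hk : (((empty.length - pos.toNat : Nat) : Int) - 1).toNat
          = empty.length - 1 - pos.toNat := by omega
      have hlt : pos.toNat < empty.length := by omega
      simp only [hs, hk]
      rw [inner_char empty (empty.length - 1 - pos.toNat) 1 pos h0 hlt rfl]
      set L : Nat := (runLens empty).getD pos.toNat 1 with hL
      have h1 : (1 : Int) + (L : Nat) - 1 = (L : Int) := by ring
      simp only [h1]
      by_cases hm : m ≤ (L : Int)
      · rw [if_pos hm, if_pos hm]
      · rw [if_neg hm, if_neg hm]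
        have h2 : pos + (L : Int) - 1 + 1 = pos + (L : Int) := by ring
        rw [h2]
        exact ih (pos + (L : Int)) (by positivity)
    · rw [if_pos (by omega), if_neg h]

-- ===== VERDICT (by name: the statement is the Claim_ definition above) =====
theorem check_empty_block_spec : Claim_equal_check_empty_block := by
  intro empty min_length pos _ hpre
  unfold Spec_check_empty_block check_empty_block check_empty_block_alt
  exact outer_eq empty min_length _ pos hpre
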